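-- pv_equiv track=rewrite | github.com/SadaleNet/ilo-nena | src/scripts/generate_lookup_table.py | encode_trigger_as_u24
-- ===== SOURCE A (Python) =====
-- WAKALITO_KEY_VALUES = ' 123456qwertysdf'
--
-- def encode_trigger_as_u24(trigger):
-- 	if len(trigger) > 6:
-- 		return 0
--
-- 	ret = 0
-- 	shift = 24-4
-- 	for c in trigger:
-- 		key_id = WAKALITO_KEY_VALUES.find(c)
-- 		if key_id == -1:
-- 			return 0
-- 		ret |= key_id << shift
-- 		shift -= 4
-- 	return ret
-- ===== SOURCE B (Python) =====
-- WAKALITO_KEY_VALUES = ' 123456qwertysdf'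
-- _HEX_OF_KEY = {c: '0123456789abcdef'[i] for i, c in enumerate(WAKALITO_KEY_VALUES)}
--
-- def encode_trigger_as_u24(trigger):
-- 	if len(trigger) > 6:
-- 		return 0
-- 	digits = [_HEX_OF_KEY.get(c) for c in trigger]
-- 	if None in digits:
-- 		return 0
-- 	return int(''.join(digits).ljust(6, '0'), 16)
-- ===== Notes on version B (the rewrite author's own statement) =====
-- stated objective: alternative
-- what changed: Replaces A's bitwise OR-at-decreasing-shift accumulation loop by a table-driven textual encoding: a precomputed char-to-hex-digit dict maps the trigger to a list of hex digit strings, which is joined, right-padded with zero digits to width six, and parsed once with int(.., 16).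
import Mathlib
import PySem

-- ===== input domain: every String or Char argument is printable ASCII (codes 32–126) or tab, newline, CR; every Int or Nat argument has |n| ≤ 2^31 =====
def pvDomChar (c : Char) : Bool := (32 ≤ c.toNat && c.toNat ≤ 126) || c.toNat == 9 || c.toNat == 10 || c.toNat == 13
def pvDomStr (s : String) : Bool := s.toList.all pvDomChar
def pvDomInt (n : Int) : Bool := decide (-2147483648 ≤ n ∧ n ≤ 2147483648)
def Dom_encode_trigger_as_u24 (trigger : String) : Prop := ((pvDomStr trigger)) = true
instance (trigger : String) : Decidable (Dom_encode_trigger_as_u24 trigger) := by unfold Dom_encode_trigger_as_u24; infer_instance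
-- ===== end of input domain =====

-- B replaces A's bitwise OR-at-decreasing-shift loop by a table-driven textual encoding:
-- a precomputed char->hex-digit dict, join, right-pad to six digits, one base-16 parse.


-- ===== PORT A =====
def wakalitoKeyValues : String := " 123456qwertysdf"

-- WAKALITO_KEY_VALUES.find(c) for a single character c
def keyOf (c : Char) : Int := PySem.Str.find wakalitoKeyValues (String.ofList [c])

-- A's loop: ret |= key_id << shift; shift -= 4.  shift stays ≥ 0 (at most 6 iterations
-- starting from 20), so `.toNat` on the shift is exact on every executed iteration.
def encodeAGo : List Char → Int → Int → Int
  | [], ret, _ => ret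
  | c :: rest, ret, shift =>
      if keyOf c = -1 then 0
      else encodeAGo rest (PySem.Int.bor ret (keyOf c <<< shift.toNat)) (shift - 4)

def encode_trigger_as_u24 (trigger : String) : Int :=
  if 6 < PySem.Str.len trigger then 0
  else encodeAGo trigger.toList 0 (24 - 4)

-- ===== PORT B =====
def hexDigitsStr : String := "0123456789abcdef"

-- _HEX_OF_KEY = {c: '0123456789abcdef'[i] for i, c in enumerate(WAKALITO_KEY_VALUES)}
-- (the index i produced by enumerate is always in range, so the total pyGetD is exact)
def hexOfKey : PySem.Dict Char Char :=
  (PySem.List.enumerate wakalitoKeyValues.toList).foldl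
    (fun d p => d.insert p.2 (PySem.List.pyGetD hexDigitsStr.toList p.1 '0')) PySem.Dict.empty

-- int(s, 16) for the lowercase hex digits this program feeds it (hand port, exact there)
def hexDigitVal (c : Char) : Int :=
  if c ≤ '9' then (c.toNat : Int) - 48 else (c.toNat : Int) - 87

def parseHex16 : List Char → Int → Int
  | [], acc => acc
  | c :: rest, acc => parseHex16 rest (acc * 16 + hexDigitVal c)

def encode_trigger_as_u24_alt (trigger : String) : Int :=
  if 6 < PySem.Str.len trigger then 0
  else
    let digits := trigger.toList.map (fun c => hexOfKey.get? c)
    if digits.contains none then 0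
    -- ''.join(digits) with no None present, then .ljust(6, '0'), then int(_, 16)
    else parseHex16 (digits.reduceOption ++ List.replicate (6 - digits.length) '0') 0

-- ===== PRECONDITION & SPEC =====
def Spec_encode_trigger_as_u24 (trigger : String) (out : Int) : Prop := out = encode_trigger_as_u24_alt trigger
instance (trigger : String) (out : Int) : Decidable (Spec_encode_trigger_as_u24 trigger out) := by unfold Spec_encode_trigger_as_u24; infer_instance

-- ===== CLAIM (what is proved, stated in full; the proofs are below) =====
def Claim_equal_encode_trigger_as_u24 : Prop := ∀ (trigger : String), Dom_encode_trigger_as_u24 trigger → Spec_encode_trigger_as_u24 trigger (encode_trigger_as_u24 trigger)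

-- ===== LEMMAS AND PROOFS =====

lemma keyOf_eq (c : Char) : keyOf c = PySem.Chars.find wakalitoKeyValues.toList [c] := by
  simp [keyOf, PySem.Str.find_eq]

lemma singleton_infix_iff {c : Char} {l : List Char} : [c] <:+: l ↔ c ∈ l := by
  constructor
  · intro h
    exact h.sublist.mem (List.mem_singleton_self c)
  · intro h
    obtain ⟨s, t, rfl⟩ := List.append_of_mem h
    exact ⟨s, t, by simp⟩

lemma keyOf_ne_iff (c : Char) : keyOf c ≠ -1 ↔ c ∈ wakalitoKeyValues.toList := by
  rw [keyOf_eq, PySem.Chars.find_ne_neg_one_iff, singleton_infix_iff]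

lemma keyOf_lt (c : Char) (h : keyOf c ≠ -1) : 0 ≤ keyOf c ∧ keyOf c < 16 := by
  rw [keyOf_eq] at h ⊢
  have hinf : [c] <:+: wakalitoKeyValues.toList := by
    by_contra hn
    exact h ((PySem.Chars.find_eq_neg_one_iff _ _).mpr hn)
  have h0 : 0 ≤ PySem.Chars.find wakalitoKeyValues.toList [c] :=
    (PySem.Chars.find_nonneg_iff _ _).mpr hinf
  refine ⟨h0, ?_⟩
  have hspec := (PySem.Chars.find_spec (s := wakalitoKeyValues.toList) (sub := [c]) h0).1
  have hlen := hspec.length_le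
  rw [List.length_drop] at hlen
  have hw : wakalitoKeyValues.toList.length = 16 := by decide
  simp only [List.length_cons, List.length_nil, hw] at hlen
  omega

-- the dict misses c exactly when A's find returns -1
lemma get?_hexOfKey_none_iff (c : Char) : hexOfKey.get? c = none ↔ keyOf c = -1 := by
  rw [PySem.Dict.get?_eq_none_iff_not_mem_keys]
  have hkeys : hexOfKey.keys = wakalitoKeyValues.toList := by decide
  rw [hkeys]
  constructor
  · intro h
    by_contra hne
    exact h ((keyOf_ne_iff c).mp hne)
  · intro h hmem
    exact ((keyOf_ne_iff c).mpr hmem) h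

def digOf (c : Char) : Char := (hexOfKey.get? c).getD '0'

lemma get?_hexOfKey_valid (c : Char) (h : keyOf c ≠ -1) : hexOfKey.get? c = some (digOf c) := by
  have hne : hexOfKey.get? c ≠ none := fun hn => h ((get?_hexOfKey_none_iff c).mp hn)
  cases hg : hexOfKey.get? c with
  | none => exact absurd hg hne
  | some d => simp [digOf, hg]

lemma hexDigitVal_digOf (c : Char) (h : keyOf c ≠ -1) : hexDigitVal (digOf c) = keyOf c := by
  have hmem := (keyOf_ne_iff c).mp h
  have hlit : wakalitoKeyValues.toList =
      [' ', '1', '2', '3', '4', '5', '6', 'q', 'w', 'e', 'r', 't', 'y', 's', 'd', 'f'] := by decide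
  rw [hlit] at hmem
  simp only [List.mem_cons, List.not_mem_nil, or_false] at hmem
  rcases hmem with rfl | rfl | rfl | rfl | rfl | rfl | rfl | rfl | rfl | rfl | rfl | rfl | rfl | rfl | rfl | rfl <;> decide

-- A returns 0 as soon as any character is absent, whatever the accumulated state is
lemma encodeAGo_invalid : ∀ (cs : List Char) (ret shift : Int),
    (∃ c ∈ cs, keyOf c = -1) → encodeAGo cs ret shift = 0 := by
  intro cs
  induction cs with
  | nil => intro _ _ h; rcases h with ⟨c, hc, _⟩; simp at hc
  | cons c rest ih =>
      intro ret shift h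
      rcases h with ⟨d, hd, hkey⟩
      simp only [List.mem_cons] at hd
      by_cases hc : keyOf c = -1
      · simp [encodeAGo, hc]
      · rcases hd with rfl | hd
        · exact absurd hkey hc
        · simp only [encodeAGo, if_neg hc]
          exact ih _ _ ⟨d, hd, hkey⟩

-- Nat-level Horner value of a valid trigger (proof-side bridge between the two ports)
def hornerNat : List Char → Nat → Nat
  | [], a => a
  | c :: rest, a => hornerNat rest (a * 16 + (keyOf c).toNat)

-- the one OR step: with the nibble slot free, OR is addition
lemma bor_step (a k n : Nat) (hk : k < 16) :
    PySem.Int.bor ((a <<< (4 * n + 4) : Nat) : Int) (((k : Int)) <<< (4 * n)) =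
      (((a * 16 + k) <<< (4 * n) : Nat) : Int) := by
  have hcast : ((k : Int)) <<< (4 * n) = ((k <<< (4 * n) : Nat) : Int) := rfl
  rw [hcast, PySem.Int.bor_natCast]
  congr 1
  have hb : k <<< (4 * n) < 2 ^ (4 * n + 4) := by
    have := Nat.shiftLeft_lt (x := k) (n := 4) (m := 4 * n) hk
    simpa [Nat.add_comm] using this
  rw [← Nat.shiftLeft_add_eq_or_of_lt hb]
  simp only [Nat.shiftLeft_eq]
  ring

-- main invariant: A's shift/OR loop computes the Horner value left-shifted into place
lemma encodeAGo_eq : ∀ (cs : List Char), (∀ c ∈ cs, keyOf c ≠ -1) →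
    ∀ (k a : Nat), cs.length ≤ k + 1 →
    encodeAGo cs ((a <<< (4 * (k + 1)) : Nat) : Int) (4 * (k : Int)) =
      ((hornerNat cs a <<< (4 * (k + 1 - cs.length)) : Nat) : Int) := by
  intro cs
  induction cs with
  | nil => intro _ k a _; simp [encodeAGo, hornerNat]
  | cons c rest ih =>
      intro hval k a hlen
      have hkc := hval c (by simp)
      have hk0 := (keyOf_lt c hkc).1
      have hk16 := (keyOf_lt c hkc).2
      have hkey : keyOf c = (((keyOf c).toNat : Nat) : Int) := (Int.toNat_of_nonneg hk0).symm
      have hlt : (keyOf c).toNat < 16 := by omega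
      simp only [encodeAGo, if_neg hkc]
      have hshift : ((4 * (k : Int))).toNat = 4 * k := by omega
      have hmul : 4 * (k + 1) = 4 * k + 4 := by ring
      rw [hshift, hmul, hkey, bor_step a (keyOf c).toNat k hlt]
      cases k with
      | zero =>
          have hnil : rest = [] := by
            have : rest.length = 0 := by
              simp only [List.length_cons] at hlen; omega
            exact List.eq_nil_of_length_eq_zero this
          subst hnil
          simp [encodeAGo, hornerNat]
      | succ k' =>
          have hrest : rest.length ≤ k' + 1 := by
            simp only [List.length_cons] at hlen; omega
          have h4 : (4 * (((k' + 1 : Nat)) : Int)) - 4 = 4 * ((k' : Nat) : Int) := by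
            push_cast; ring
          rw [h4, ih (fun d hd => hval d (List.mem_cons_of_mem _ hd)) k' (a * 16 + (keyOf c).toNat) hrest]
          have hexp : k' + 1 + 1 - (c :: rest).length = k' + 1 - rest.length := by
            simp only [List.length_cons]; omega
          rw [show hornerNat (c :: rest) a = hornerNat rest (a * 16 + (keyOf c).toNat) from rfl, hexp]

lemma encodeAGo_top (cs : List Char) (hval : ∀ c ∈ cs, keyOf c ≠ -1) (hlen : cs.length ≤ 6) :
    encodeAGo cs 0 (24 - 4) = ((hornerNat cs 0 <<< (4 * (6 - cs.length)) : Nat) : Int) := by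
  have h := encodeAGo_eq cs hval 5 0 (by omega)
  have e0 : (((0 : Nat) <<< (4 * (5 + 1)) : Nat) : Int) = 0 := by
    norm_num [Nat.shiftLeft_eq]
  have e1 : (4 * ((5 : Nat) : Int)) = 24 - 4 := by norm_num
  rw [e0, e1] at h
  simpa using h

-- `None in digits` detects exactly the inputs on which A's find returns -1
lemma contains_none_iff (cs : List Char) :
    ((cs.map (fun c => hexOfKey.get? c)).contains none = true) ↔ ∃ c ∈ cs, keyOf c = -1 := by
  simp only [List.contains_eq_mem, List.mem_map, decide_eq_true_eq]
  constructor
  · rintro ⟨c, hc, hnone⟩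
    exact ⟨c, hc, (get?_hexOfKey_none_iff c).mp hnone⟩
  · rintro ⟨c, hc, hkey⟩
    exact ⟨c, hc, (get?_hexOfKey_none_iff c).mpr hkey⟩

-- join of an all-some digit list is the per-character digit map
lemma reduceOption_digits (cs : List Char) (hval : ∀ c ∈ cs, keyOf c ≠ -1) :
    (cs.map (fun c => hexOfKey.get? c)).reduceOption = cs.map digOf := by
  induction cs with
  | nil => simp
  | cons c rest ih =>
      have hc := get?_hexOfKey_valid c (hval c (by simp))
      simp only [List.map_cons, hc, List.reduceOption_cons_of_some]
      rw [ih (fun d hd => hval d (List.mem_cons_of_mem _ hd))]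

lemma parseHex16_append (xs ys : List Char) : ∀ (acc : Int),
    parseHex16 (xs ++ ys) acc = parseHex16 ys (parseHex16 xs acc) := by
  induction xs with
  | nil => intro acc; simp [parseHex16]
  | cons c rest ih => intro acc; simp only [List.cons_append, parseHex16]; exact ih _

lemma parseHex16_replicate_zero : ∀ (m : Nat) (v : Int),
    parseHex16 (List.replicate m '0') v = v * 16 ^ m := by
  intro m
  induction m with
  | zero => intro v; simp [parseHex16]
  | succ m' ih =>
      intro v
      rw [List.replicate_succ]
      show parseHex16 (List.replicate m' '0') (v * 16 + hexDigitVal '0') = v * 16 ^ (m' + 1)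
      rw [show hexDigitVal '0' = 0 from by decide, add_zero, ih, pow_succ]
      ring

lemma parseHex16_map_digOf (cs : List Char) (hval : ∀ c ∈ cs, keyOf c ≠ -1) : ∀ (a : Nat),
    parseHex16 (cs.map digOf) (a : Int) = ((hornerNat cs a : Nat) : Int) := by
  induction cs with
  | nil => intro a; simp [parseHex16, hornerNat]
  | cons c rest ih =>
      intro a
      have hkc := hval c (by simp)
      have hc0 := (keyOf_lt c hkc).1
      have hdig := hexDigitVal_digOf c hkc
      simp only [List.map_cons, parseHex16, hornerNat, hdig]
      have hcast : (a : Int) * 16 + keyOf c = ((a * 16 + (keyOf c).toNat : Nat) : Int) := by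
        push_cast [Int.toNat_of_nonneg hc0]; ring
      rw [hcast]
      exact ih (fun d hd => hval d (List.mem_cons_of_mem _ hd)) _

-- ===== VERDICT (by name: the statement is the Claim_ definition above) =====
theorem encode_trigger_as_u24_spec : Claim_equal_encode_trigger_as_u24 := by
  intro trigger _
  unfold Spec_encode_trigger_as_u24 encode_trigger_as_u24 encode_trigger_as_u24_alt
  by_cases hlen : 6 < PySem.Str.len trigger
  · rw [if_pos hlen, if_pos hlen]
  · rw [if_neg hlen, if_neg hlen]
    by_cases hinv : ∃ c ∈ trigger.toList, keyOf c = -1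
    · rw [encodeAGo_invalid _ _ _ hinv]
      simp only []
      rw [if_pos ((contains_none_iff trigger.toList).mpr hinv)]
    · have hval : ∀ c ∈ trigger.toList, keyOf c ≠ -1 := fun c hc h => hinv ⟨c, hc, h⟩
      have hb : ¬ ((trigger.toList.map (fun c => hexOfKey.get? c)).contains none = true) :=
        fun h => hinv ((contains_none_iff trigger.toList).mp h)
      simp only []
      rw [if_neg hb]
      have hlen6 : trigger.toList.length ≤ 6 := by
        have hl : PySem.Str.len trigger = (trigger.toList.length : Int) := by
          simp [PySem.Str.len_eq]
        omega
      rw [encodeAGo_top trigger.toList hval hlen6]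
      rw [reduceOption_digits trigger.toList hval, List.length_map]
      have hmap := parseHex16_map_digOf trigger.toList hval 0
      push_cast at hmap
      rw [parseHex16_append, hmap, parseHex16_replicate_zero]
      rw [Nat.shiftLeft_eq]
      push_cast
      rw [show ((2 : Int) ^ (4 * (6 - trigger.toList.length)) = 16 ^ (6 - trigger.toList.length)) from by
        rw [pow_mul]; norm_num]
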